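-- pv_equiv track=rewrite | github.com/najarvis/CSE-464-Packing-Algorithm | testing_grounds.py | num_sharing_dim
-- ===== SOURCE A (Python) =====
-- def num_sharing_dim(current_dim, volume):
--     """calculates the number of elements that are the same between the two arrays.
--     Make sure to pass current[1][:3] in to only get the dimensions."""
--
--     assert len(current_dim) == len(volume)
--     curr_dim_copy = current_dim[:]
--     vol_copy = volume[:]
--     for dim in current_dim:
--         if dim in vol_copy:
--             curr_dim_copy.remove(dim)
--             vol_copy.remove(dim)
--
--     return 3 - len(curr_dim_copy)
-- ===== SOURCE B (Python) =====
-- def num_sharing_dim(current_dim, volume):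
--     """calculates the number of elements that are the same between the two arrays.
--     Frequency-table version: count both sides once, matches = sum of per-value minima."""
--     assert len(current_dim) == len(volume)
--     ca = {}
--     for v in current_dim:
--         ca[v] = ca.get(v, 0) + 1
--     cb = {}
--     for v in volume:
--         cb[v] = cb.get(v, 0) + 1
--     matches = sum(min(n, cb.get(k, 0)) for k, n in ca.items())
--     return 3 - len(current_dim) + matches
-- ===== Notes on version B (the rewrite author's own statement) =====
-- stated objective: faster
-- what changed: Replaces the in-place scan-and-remove loop (membership test plus two list.remove per element) with two frequency tables built in one pass each, the match count being the sum of per-value minima (multiset intersection).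
import Mathlib
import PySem

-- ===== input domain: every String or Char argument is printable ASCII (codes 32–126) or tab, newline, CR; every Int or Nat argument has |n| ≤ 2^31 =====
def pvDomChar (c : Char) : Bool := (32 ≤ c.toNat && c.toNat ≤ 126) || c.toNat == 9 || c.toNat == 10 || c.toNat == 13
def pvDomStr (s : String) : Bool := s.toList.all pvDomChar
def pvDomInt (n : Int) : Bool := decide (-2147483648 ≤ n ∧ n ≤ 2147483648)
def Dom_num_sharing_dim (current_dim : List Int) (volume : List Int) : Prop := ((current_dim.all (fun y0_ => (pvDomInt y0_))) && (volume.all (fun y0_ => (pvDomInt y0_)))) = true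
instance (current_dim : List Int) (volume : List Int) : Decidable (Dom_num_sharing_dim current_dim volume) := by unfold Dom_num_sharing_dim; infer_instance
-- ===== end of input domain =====

-- ===== PORT A =====
-- B replaces A's quadratic scan-and-remove loop with two one-pass frequency tables (objective: faster).
-- A's list.remove is ported as List.erase: exact here, since the removed element is always present
-- (the branch test guarantees it for vol_copy; for curr_dim_copy at most one copy per earlier
-- occurrence of the same value of current_dim has been removed).
def num_sharing_dim (current_dim : List Int) (volume : List Int) : Int :=
  let fin := current_dim.foldl
    (fun (st : List Int × List Int) dim =>
      if dim ∈ st.2 then (st.1.erase dim, st.2.erase dim) else st)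
    (current_dim, volume)
  3 - (fin.1.length : Int)

-- ===== PORT B =====
def num_sharing_dim_alt (current_dim : List Int) (volume : List Int) : Int :=
  let ca := current_dim.foldl (fun d x => d.insert x (d.getD x 0 + 1)) (PySem.Dict.empty : PySem.Dict Int Int)
  let cb := volume.foldl (fun d x => d.insert x (d.getD x 0 + 1)) (PySem.Dict.empty : PySem.Dict Int Int)
  let m := (ca.items.map (fun kn => min kn.2 (cb.getD kn.1 0))).sum
  3 - (current_dim.length : Int) + m

-- ===== PRECONDITION & SPEC =====
-- Pre_: the assert — Python A raises AssertionError when the lengths differ.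
def Pre_num_sharing_dim (current_dim : List Int) (volume : List Int) : Prop :=
  current_dim.length = volume.length
instance (current_dim : List Int) (volume : List Int) : Decidable (Pre_num_sharing_dim current_dim volume) := by unfold Pre_num_sharing_dim; infer_instance
def pvWitness_num_sharing_dim : List Int × List Int := ([1, 2, 2], [2, 3, 2])

def Spec_num_sharing_dim (current_dim : List Int) (volume : List Int) (out : Int) : Prop := out = num_sharing_dim_alt current_dim volume
instance (current_dim : List Int) (volume : List Int) (out : Int) : Decidable (Spec_num_sharing_dim current_dim volume out) := by unfold Spec_num_sharing_dim; infer_instance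

-- ===== CLAIM (what is proved, stated in full; the proofs are below) =====
def Claim_equal_num_sharing_dim : Prop := ∀ (current_dim : List Int) (volume : List Int), Dom_num_sharing_dim current_dim volume → Pre_num_sharing_dim current_dim volume → Spec_num_sharing_dim current_dim volume (num_sharing_dim current_dim volume)

-- ===== LEMMAS AND PROOFS =====

-- number of iterations of A's loop that take the "dim in vol_copy" branch
def pvHits : List Int → List Int → Nat
  | [], _ => 0
  | d :: r, vol => if d ∈ vol then pvHits r (vol.erase d) + 1 else pvHits r vol

-- A's loop: the first component loses exactly one element per hit (the count hypothesis
-- says every value occurs in cur at least as often as in the remaining list l, so each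
-- erase really removes an element — it holds at the start, where cur = l)
theorem pvLoopA (l : List Int) : ∀ (cur vol : List Int), (∀ v, l.count v ≤ cur.count v) →
    ((l.foldl (fun (st : List Int × List Int) dim =>
        if dim ∈ st.2 then (st.1.erase dim, st.2.erase dim) else st) (cur, vol)).1).length
      + pvHits l vol = cur.length := by
  induction l with
  | nil => intro cur vol _; simp [pvHits]
  | cons d r ih =>
    intro cur vol hcnt
    have hdcur : d ∈ cur := by
      have := hcnt d
      simp only [List.count_cons_self] at this
      exact List.count_pos_iff.mp (by omega)
    by_cases h : d ∈ vol
    · have hrec := ih (cur.erase d) (vol.erase d) (by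
        intro v
        have hc := hcnt v
        rw [List.count_cons] at hc
        rcases eq_or_ne v d with rfl | hv
        · rw [List.count_erase_self]
          simp only [BEq.rfl, if_true] at hc
          omega
        · rw [List.count_erase_of_ne hv]
          simpa [Ne.symm hv] using hc)
      rw [List.length_erase_of_mem hdcur] at hrec
      have hlen : 1 ≤ cur.length := List.length_pos_of_mem hdcur
      simp only [List.foldl_cons, pvHits, if_pos h]
      omega
    · have hrec := ih cur vol (fun v => le_trans (List.count_le_count_cons ..) (hcnt v))
      simp only [List.foldl_cons, pvHits, if_neg h]
      exact hrec

-- the hit count is the cardinality of the multiset intersection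
theorem pvHits_eq_card (l : List Int) : ∀ vol : List Int,
    pvHits l vol = Multiset.card ((l : Multiset Int) ∩ (vol : Multiset Int)) := by
  induction l with
  | nil => intro vol; simp [pvHits]
  | cons d r ih =>
    intro vol
    by_cases h : d ∈ vol
    · have h' : d ∈ (vol : Multiset Int) := by simpa using h
      rw [pvHits, if_pos h, ih, show ((d :: r : List Int) : Multiset Int) = d ::ₘ (r : Multiset Int) from rfl,
        Multiset.cons_inter_of_pos _ h', Multiset.card_cons, ← Multiset.coe_erase]
    · have h' : d ∉ (vol : Multiset Int) := by simpa using h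
      rw [pvHits, if_neg h, ih, show ((d :: r : List Int) : Multiset Int) = d ::ₘ (r : Multiset Int) from rfl,
        Multiset.cons_inter_of_neg _ h']

theorem pvToFinset_ofList (l : List Int) : (PySem.Set.ofList l).toFinset = l.toFinset := by
  ext x
  simp [List.mem_toFinset, PySem.Set.mem_ofList]

-- B's sum of per-value minima is the same cardinality
theorem pvSum_eq_card (l vol : List Int) :
    ((PySem.Set.ofList l).map (fun k => min ((l.count k : Int)) ((vol.count k : Int)))).sum
      = (Multiset.card ((l : Multiset Int) ∩ (vol : Multiset Int)) : Int) := by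
  rw [← List.sum_toFinset _ (PySem.Set.nodup_ofList l), pvToFinset_ofList]
  have hcard : Multiset.card ((l : Multiset Int) ∩ (vol : Multiset Int))
      = ∑ x ∈ l.toFinset, ((l : Multiset Int) ∩ (vol : Multiset Int)).count x := by
    rw [← Multiset.toFinset_sum_count_eq]
    apply Finset.sum_subset
    · intro x hx
      rw [List.mem_toFinset]
      have hmem : x ∈ ((l : Multiset Int) ∩ (vol : Multiset Int)) := Multiset.mem_toFinset.mp hx
      simpa using (Multiset.mem_inter.mp hmem).1
    · intro x _ hxs
      rw [Multiset.count_eq_zero]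
      exact fun hmem => hxs (Multiset.mem_toFinset.mpr hmem)
  rw [hcard, Nat.cast_sum]
  apply Finset.sum_congr rfl
  intro k _
  rw [Multiset.count_inter]
  push_cast [Multiset.coe_count]
  rfl

-- ===== VERDICT (by name: the statement is the Claim_ definition above) =====
theorem num_sharing_dim_spec : Claim_equal_num_sharing_dim := by
  intro cd vol _ _
  unfold Spec_num_sharing_dim
  simp only [num_sharing_dim, num_sharing_dim_alt,
    PySem.Dict.foldl_insert_getD_add_one_eq_counter, PySem.Dict.items_counter, List.map_map]
  have hB : ((PySem.Set.ofList cd).map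
      ((fun kn : Int × Int => min kn.2 ((PySem.Dict.counter vol).getD kn.1 0)) ∘
        fun k => (k, (cd.count k : Int)))).sum
      = (Multiset.card ((cd : Multiset Int) ∩ (vol : Multiset Int)) : Int) := by
    rw [← pvSum_eq_card cd vol]
    apply congrArg
    apply List.map_congr_left
    intro k _
    simp [Function.comp, PySem.Dict.getD_counter]
  rw [hB]
  have hA := pvLoopA cd cd vol (fun v => le_refl _)
  have hH := pvHits_eq_card cd vol
  omega
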